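-- pv_equiv track=rewrite | github.com/xueyu888/framework | scripts/validate_strict_mapping.py | find_mapping_key_line
-- ===== SOURCE A (Python) =====
-- def get_mapping_block_bounds(registry_text: str, map_id: str) -> tuple[int, int]:
--     lines = registry_text.splitlines()
--     start = 1
--     end = len(lines)
--
--     id_token = f'"id": "{map_id}"'
--     for idx, line in enumerate(lines, start=1):
--         if id_token in line:
--             start = idx
--             break
--
--     for idx in range(start + 1, len(lines) + 1):
--         if '"id": "' in lines[idx - 1]:
--             end = idx - 1
--             break
--
--     return start, end
--
-- def find_mapping_key_line(registry_text: str, map_id: str, key: str) -> int: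
--     lines = registry_text.splitlines()
--     start, end = get_mapping_block_bounds(registry_text, map_id)
--     key_token = f'"{key}"'
--     for idx in range(start, end + 1):
--         if key_token in lines[idx - 1]:
--             return idx
--     return start
-- ===== SOURCE B (Python) =====
-- def find_mapping_key_line(registry_text: str, map_id: str, key: str) -> int:
--     lines = registry_text.splitlines()
--     id_token = f'"id": "{map_id}"'
--     start = next((i for i, ln in enumerate(lines, 1) if id_token in ln), 1)
--     key_token = f'"{key}"'
--     for idx in range(start, len(lines) + 1):
--         line = lines[idx - 1]
--         if idx > start and '"id": "' in line:
--             break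
--         if key_token in line:
--             return idx
--     return start
-- ===== Notes on version B (the rewrite author's own statement) =====
-- stated objective: simpler
-- what changed: Inlined the bounds helper and fused the end-of-block search with the key scan into one early-terminating pass (breaking when a new "id": " line begins), removing the separate end computation and the second indexing loop.
import Mathlib
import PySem

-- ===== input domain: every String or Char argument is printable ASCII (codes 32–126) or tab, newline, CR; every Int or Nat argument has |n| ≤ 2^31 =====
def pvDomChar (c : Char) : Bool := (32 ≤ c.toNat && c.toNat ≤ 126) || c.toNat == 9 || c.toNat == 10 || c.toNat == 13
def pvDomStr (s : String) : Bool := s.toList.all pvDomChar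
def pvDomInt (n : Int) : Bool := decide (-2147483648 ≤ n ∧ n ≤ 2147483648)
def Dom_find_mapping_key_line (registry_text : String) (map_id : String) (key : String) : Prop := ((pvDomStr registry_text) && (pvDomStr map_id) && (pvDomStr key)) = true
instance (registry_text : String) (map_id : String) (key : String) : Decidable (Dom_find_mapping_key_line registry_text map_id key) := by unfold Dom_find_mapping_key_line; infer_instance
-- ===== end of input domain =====

-- B inlines A's bounds helper and fuses the end-of-block search with the key scan
-- into one early-terminating pass (objective: simpler).


-- ===== PORT A =====
-- lines[i] (always in range where the loops use it); getD only totalises the port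
def pvLineA (lines : List String) (i : Int) : List Char :=
  ((PySem.List.pyGet? lines i).getD "").toList

-- first loop of get_mapping_block_bounds: 'for idx, line in enumerate(lines, 1): if id_token in line: start = idx; break'
def pvStartLoopA (tok : List Char) : List (Int × String) → Int
  | [] => 1
  | (i, line) :: rest =>
    if PySem.Chars.isIn tok line.toList then i else pvStartLoopA tok rest

-- second loop: 'for idx in range(start+1, len(lines)+1): if '"id": "' in lines[idx-1]: end = idx-1; break'
def pvEndLoopA (lines : List String) (dflt : Int) : List Int → Int
  | [] => dflt
  | i :: rest =>
    if PySem.Chars.isIn "\"id\": \"".toList (pvLineA lines (i - 1)) then i - 1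
    else pvEndLoopA lines dflt rest

def get_mapping_block_bounds (registry_text : String) (map_id : String) : Int × Int :=
  let lines := PySem.Str.splitlines registry_text
  let id_token := ("\"id\": \"" ++ map_id ++ "\"").toList
  let start := pvStartLoopA id_token (PySem.List.enumerate lines 1)
  let e := pvEndLoopA lines (lines.length : Int)
      (PySem.List.pyRange (start + 1) ((lines.length : Int) + 1) 1)
  (start, e)

-- key-scan loop: 'for idx in range(start, end+1): if key_token in lines[idx-1]: return idx'
def pvKeyLoopA (lines : List String) (tok : List Char) (dflt : Int) : List Int → Int
  | [] => dflt
  | i :: rest =>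
    if PySem.Chars.isIn tok (pvLineA lines (i - 1)) then i
    else pvKeyLoopA lines tok dflt rest

def find_mapping_key_line (registry_text : String) (map_id : String) (key : String) : Int :=
  let lines := PySem.Str.splitlines registry_text
  let se := get_mapping_block_bounds registry_text map_id
  let key_token := ("\"" ++ key ++ "\"").toList
  pvKeyLoopA lines key_token se.1 (PySem.List.pyRange se.1 (se.2 + 1) 1)

-- ===== PORT B =====
-- 'start' = next((i for i, ln in enumerate(lines, 1) if id_token in ln), 1)'
def pvStartB (lines : List String) (tok : List Char) : Int :=
  match (PySem.List.enumerate lines 1).find? (fun p => PySem.Chars.isIn tok p.2.toList) with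
  | some p => p.1
  | none => 1

-- the single fused loop of B
def pvFusedB (lines : List String) (start : Int) (keyTok : List Char) : List Int → Int
  | [] => start
  | i :: rest =>
    let line := ((PySem.List.pyGet? lines (i - 1)).getD "").toList
    if decide (start < i) && PySem.Chars.isIn "\"id\": \"".toList line then start
    else if PySem.Chars.isIn keyTok line then i
    else pvFusedB lines start keyTok rest

def find_mapping_key_line_alt (registry_text : String) (map_id : String) (key : String) : Int :=
  let lines := PySem.Str.splitlines registry_text
  let id_token := ("\"id\": \"" ++ map_id ++ "\"").toList
  let start := pvStartB lines id_token
  let key_token := ("\"" ++ key ++ "\"").toList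
  pvFusedB lines start key_token (PySem.List.pyRange start ((lines.length : Int) + 1) 1)

-- ===== PRECONDITION & SPEC =====
def Spec_find_mapping_key_line (registry_text : String) (map_id : String) (key : String) (out : Int) : Prop := out = find_mapping_key_line_alt registry_text map_id key
instance (registry_text : String) (map_id : String) (key : String) (out : Int) : Decidable (Spec_find_mapping_key_line registry_text map_id key out) := by unfold Spec_find_mapping_key_line; infer_instance

-- ===== CLAIM (what is proved, stated in full; the proofs are below) =====
def Claim_equal_find_mapping_key_line : Prop := ∀ (registry_text : String) (map_id : String) (key : String), Dom_find_mapping_key_line registry_text map_id key → Spec_find_mapping_key_line registry_text map_id key (find_mapping_key_line registry_text map_id key)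

-- ===== LEMMAS AND PROOFS =====

-- the block-membership test used by both the end loop of A and the break guard of B
def pvP (lines : List String) (i : Int) : Bool :=
  PySem.Chars.isIn "\"id\": \"".toList (pvLineA lines (i - 1))

lemma start_eq (lines : List String) (tok : List Char) (s : Int) :
    pvStartLoopA tok (PySem.List.enumerate lines s) =
      (match (PySem.List.enumerate lines s).find? (fun p => PySem.Chars.isIn tok p.2.toList) with
       | some p => p.1
       | none => 1) := by
  induction lines generalizing s with
  | nil => simp [PySem.List.enumerate_nil, pvStartLoopA]
  | cons x xs ih =>
    rw [PySem.List.enumerate_cons]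
    by_cases h : PySem.Chars.isIn tok x.toList
    · simp [pvStartLoopA, List.find?, h]
    · simp only [pvStartLoopA, List.find?, h, if_neg, Bool.false_eq_true, not_false_iff]
      simpa [h] using ih (s + 1)

-- characterisation of A's 'end' computed by scanning from index j
lemma end_char (lines : List String) (j e : Int)
    (hedef : e = pvEndLoopA lines (lines.length : Int)
      (PySem.List.pyRange j ((lines.length : Int) + 1) 1)) :
    (j - 1 ≤ e ∨ (lines.length : Int) ≤ e) ∧ e ≤ (lines.length : Int) ∧
      (∀ i, j ≤ i → i ≤ e → pvP lines i = false) ∧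
      ((lines.length : Int) ≤ e ∨ pvP lines (e + 1) = true) := by
  by_cases hj : (lines.length : Int) + 1 ≤ j
  · rw [PySem.List.pyRange_one_eq_nil hj] at hedef
    simp only [pvEndLoopA] at hedef
    subst hedef
    exact ⟨Or.inr le_rfl, le_rfl,
      fun i h1 h2 => absurd (le_trans h1 h2) (by omega), Or.inl le_rfl⟩
  · rw [PySem.List.pyRange_one_cons (by omega : j < (lines.length : Int) + 1)] at hedef
    simp only [pvEndLoopA] at hedef
    by_cases h : pvP lines j = true
    · rw [if_pos (by simpa [pvP] using h)] at hedef
      refine ⟨Or.inl (by omega), by omega, fun i h1 h2 => absurd (le_trans h1 h2) (by omega),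
        Or.inr ?_⟩
      rw [show e + 1 = j by omega]; exact h
    · rw [if_neg (by simpa [pvP] using h)] at hedef
      obtain ⟨c1, c2, c3, c4⟩ := end_char lines (j + 1) e hedef
      refine ⟨by omega, c2, fun i h1 h2 => ?_, c4⟩
      by_cases hij : i = j
      · subst hij; simpa [pvP] using h
      · exact c3 i (by omega) h2
termination_by ((lines.length : Int) + 1 - j).toNat
decreasing_by omega

-- the fused loop of B, started past the block head, equals A's key scan over [j, e]
lemma main_eq (lines : List String) (keyTok : List Char) (start e : Int)
    (he1 : start ≤ e) (he2 : e ≤ (lines.length : Int))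
    (hno : ∀ i, start < i → i ≤ e → pvP lines i = false)
    (hbr : (lines.length : Int) ≤ e ∨ pvP lines (e + 1) = true)
    (j : Int) (hj : start < j)
    (hpast : ∀ i, start < i → i < j → pvP lines i = false) :
    pvKeyLoopA lines keyTok start (PySem.List.pyRange j (e + 1) 1) =
      pvFusedB lines start keyTok (PySem.List.pyRange j ((lines.length : Int) + 1) 1) := by
  by_cases hj2 : (lines.length : Int) + 1 ≤ j
  · rw [PySem.List.pyRange_one_eq_nil hj2, PySem.List.pyRange_one_eq_nil (by omega : e + 1 ≤ j)]
    simp [pvKeyLoopA, pvFusedB]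
  · rw [PySem.List.pyRange_one_cons (by omega : j < (lines.length : Int) + 1)]
    by_cases hPj : pvP lines j = true
    · have hej : e + 1 ≤ j := by
        by_contra hc
        exact absurd hPj (by simp [hno j hj (by omega)])
      rw [PySem.List.pyRange_one_eq_nil hej]
      simp [pvP, pvLineA] at hPj
      simp [pvKeyLoopA, pvFusedB, hPj, hj]
    · have hje : j ≤ e := by
        by_contra hc
        rcases hbr with hbig | hPe
        · omega
        · by_cases heq : e + 1 = j
          · rw [heq] at hPe; exact hPj hPe
          · exact absurd hPe (by simp [hpast (e + 1) (by omega) (by omega)])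
      have hPj2 : pvP lines j = false := by simpa using hPj
      rw [PySem.List.pyRange_one_cons (by omega : j < e + 1)]
      simp [pvP, pvLineA] at hPj2
      simp only [pvKeyLoopA, pvFusedB, pvLineA]
      by_cases hK : PySem.Chars.isIn keyTok ((PySem.List.pyGet? lines (j - 1)).getD "").toList = true
      · simp [hPj2, hK]
      · simp only [Bool.not_eq_true] at hK
        simp [hPj2, hK]
        refine main_eq lines keyTok start e he1 he2 hno hbr (j + 1) (by omega)
          (fun i h1 h2 => by
            by_cases hij : i = j
            · subst hij; simpa using hPj
            · exact hpast i h1 (by omega))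
termination_by ((lines.length : Int) + 1 - j).toNat
decreasing_by omega

-- the whole of B's fused pass equals A's bounded key scan, for any start
lemma whole_eq (lines : List String) (keyTok : List Char) (start : Int) :
    pvKeyLoopA lines keyTok start
      (PySem.List.pyRange start
        (pvEndLoopA lines (lines.length : Int)
          (PySem.List.pyRange (start + 1) ((lines.length : Int) + 1) 1) + 1) 1) =
      pvFusedB lines start keyTok (PySem.List.pyRange start ((lines.length : Int) + 1) 1) := by
  obtain ⟨c1, c2, c3, c4⟩ := end_char lines (start + 1)
    (pvEndLoopA lines (lines.length : Int)
      (PySem.List.pyRange (start + 1) ((lines.length : Int) + 1) 1)) rfl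
  generalize he : pvEndLoopA lines (lines.length : Int)
      (PySem.List.pyRange (start + 1) ((lines.length : Int) + 1) 1) = e at c1 c2 c3 c4 ⊢
  by_cases hn : (lines.length : Int) + 1 ≤ start
  · have hes : e + 1 ≤ start := by omega
    rw [PySem.List.pyRange_one_eq_nil hn, PySem.List.pyRange_one_eq_nil hes]
    simp [pvKeyLoopA, pvFusedB]
  · have he1 : start ≤ e := by rcases c1 with h | h <;> omega
    rw [PySem.List.pyRange_one_cons (by omega : start < (lines.length : Int) + 1),
      PySem.List.pyRange_one_cons (by omega : start < e + 1)]
    simp only [pvKeyLoopA, pvFusedB, pvLineA]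
    by_cases hK : PySem.Chars.isIn keyTok ((PySem.List.pyGet? lines (start - 1)).getD "").toList = true
    · simp [hK]
    · simp only [Bool.not_eq_true] at hK
      simp [hK]
      exact main_eq lines keyTok start e he1 c2 (fun i h1 h2 => c3 i (by omega) h2) c4
        (start + 1) (by omega) (fun i h1 h2 => by omega)

theorem ab_eq (registry_text map_id key : String) :
    find_mapping_key_line registry_text map_id key =
      find_mapping_key_line_alt registry_text map_id key := by
  simp only [find_mapping_key_line, find_mapping_key_line_alt, get_mapping_block_bounds]
  rw [start_eq]
  exact whole_eq (PySem.Str.splitlines registry_text)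
    (("\"" ++ key ++ "\"").toList)
    (pvStartB (PySem.Str.splitlines registry_text) (("\"id\": \"" ++ map_id ++ "\"").toList))

-- ===== VERDICT (by name: the statement is the Claim_ definition above) =====
theorem find_mapping_key_line_spec : Claim_equal_find_mapping_key_line := by
  intro r m k _
  unfold Spec_find_mapping_key_line
  exact ab_eq r m k
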